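-- pv_equiv track=rewrite | github.com/jeffheaton/aifh | vol1/python-examples/examples/example_normalize.py | buildClassMap
-- ===== SOURCE A (Python) =====
-- def buildClassMap(dataset, col):
--     result = {}
--     index = 0
--     for row in dataset:
--         key = row[col]
--         if key not in result:
--             result[key] = index
--             index += 1
--     return result
-- ===== SOURCE B (Python) =====
-- def buildClassMap(dataset, col):
--     # Record each distinct column value's first-occurrence position, then rank
--     # the keys by sorting on that position (no running index counter).
--     first = {}
--     for pos, row in enumerate(dataset):
--         first.setdefault(row[col], pos)
--     order = sorted(first, key=first.get)
--     return {k: rank for rank, k in enumerate(order)}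
-- ===== Notes on version B (the rewrite author's own statement) =====
-- stated objective: alternative
-- what changed: Instead of maintaining a running index counter while scanning, B records each distinct value's first-occurrence position with setdefault and then assigns indices by sorting the keys on that position and ranking them with enumerate.
import Mathlib
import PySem

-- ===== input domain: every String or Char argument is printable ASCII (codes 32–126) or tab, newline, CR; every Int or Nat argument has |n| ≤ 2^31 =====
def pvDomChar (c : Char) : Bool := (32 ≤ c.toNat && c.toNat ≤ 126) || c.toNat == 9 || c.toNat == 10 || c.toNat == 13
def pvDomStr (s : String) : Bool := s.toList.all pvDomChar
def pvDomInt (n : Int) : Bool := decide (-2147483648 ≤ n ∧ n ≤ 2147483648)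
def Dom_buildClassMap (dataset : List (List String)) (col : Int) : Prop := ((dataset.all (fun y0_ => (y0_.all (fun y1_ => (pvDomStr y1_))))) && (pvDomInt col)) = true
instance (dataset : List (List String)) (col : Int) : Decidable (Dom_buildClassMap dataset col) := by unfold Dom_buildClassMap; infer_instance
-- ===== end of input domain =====

-- B replaces A's scan with a running index counter by a different mechanism:
-- record first-occurrence positions, sort the keys by that position, rank with
-- enumerate; same return value, similar cost.

-- ===== PORT A =====
-- A's loop: a dict plus a running index; row[col] out of range raises (excluded by Pre_;
-- the port keeps the state unchanged there).
def buildClassMap (dataset : List (List String)) (col : Int) : List (String × Int) :=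
  (dataset.foldl
    (fun (st : PySem.Dict String Int × Int) row =>
      match PySem.List.pyGet? row col with
      | some key => if st.1.contains key then st else (st.1.insert key st.2, st.2 + 1)
      | none => st)
    (PySem.Dict.empty, 0)).1.items

-- ===== PORT B =====
-- first.setdefault(row[col], pos) over enumerate(dataset); then sorted(first, key=first.get)
-- and ranking by enumerate. row[col] is pyGetD (in range under Pre_).
def buildClassMap_alt (dataset : List (List String)) (col : Int) : List (String × Int) :=
  let first := (PySem.List.enumerate dataset).foldl
    (fun (d : PySem.Dict String Int) p => d.setdefault (PySem.List.pyGetD p.2 col "") p.1)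
    PySem.Dict.empty
  let order := PySem.List.sorted (PySem.Dict.keys first) (fun k => first.getD k 0) false
  (PySem.List.enumerate order).map (fun p => (p.2, p.1))

-- ===== PRECONDITION & SPEC =====
-- Pre_ excludes exactly the inputs where row[col] raises IndexError in both Pythons.
def Pre_buildClassMap (dataset : List (List String)) (col : Int) : Prop :=
  ∀ row ∈ dataset, PySem.Raise.InRange row.length col
instance (dataset : List (List String)) (col : Int) : Decidable (Pre_buildClassMap dataset col) := by unfold Pre_buildClassMap; infer_instance

def pvWitness_buildClassMap : List (List String) × Int := ([["a", "x"], ["b", "y"], ["a", "z"]], 0)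

def Spec_buildClassMap (dataset : List (List String)) (col : Int) (out : List (String × Int)) : Prop := out = buildClassMap_alt dataset col
instance (dataset : List (List String)) (col : Int) (out : List (String × Int)) : Decidable (Spec_buildClassMap dataset col out) := by unfold Spec_buildClassMap; infer_instance

-- ===== CLAIM (what is proved, stated in full; the proofs are below) =====
def Claim_equal_buildClassMap : Prop := ∀ (dataset : List (List String)) (col : Int), Dom_buildClassMap dataset col → Pre_buildClassMap dataset col → Spec_buildClassMap dataset col (buildClassMap dataset col)

-- ===== LEMMAS AND PROOFS =====

-- A's loop body on the state, keyed directly by the column value.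
def pvStep (st : PySem.Dict String Int × Int) (key : String) : PySem.Dict String Int × Int :=
  if st.1.contains key then st else (st.1.insert key st.2, st.2 + 1)

-- Under Pre_, A's fold over rows is the fold of pvStep over the extracted key list.
lemma fold_rows_eq_fold_keys (dataset : List (List String)) (col : Int)
    (hpre : Pre_buildClassMap dataset col) (st : PySem.Dict String Int × Int) :
    dataset.foldl
      (fun (st : PySem.Dict String Int × Int) row =>
        match PySem.List.pyGet? row col with
        | some key => if st.1.contains key then st else (st.1.insert key st.2, st.2 + 1)
        | none => st) st
    = (dataset.map (fun row => PySem.List.pyGetD row col "")).foldl pvStep st := by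
  induction dataset generalizing st with
  | nil => rfl
  | cons row rest ih =>
    have hin : PySem.Raise.InRange row.length col := hpre row (by simp)
    have hg : PySem.List.pyGet? row col = some (PySem.List.pyGetD row col "") := by
      cases h : PySem.List.pyGet? row col with
      | none => exact absurd ((PySem.List.pyGet?_eq_none_iff row col).mp h) (by simpa using hin)
      | some v => simp [PySem.List.pyGetD, h]
    simp only [List.foldl_cons, List.map_cons, hg]
    exact ih (fun r hr => hpre r (by simp [hr])) _

-- A-side loop invariant: with keys 'seen' already numbered 0,…,len-1, folding pvStep
-- over ks yields the numbering of Set.update seen ks.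
lemma loop_invariant (ks seen : List String) (d : PySem.Dict String Int)
    (hk : PySem.Dict.keys d = seen)
    (hi : d.items = (PySem.List.enumerate seen).map (fun p => (p.2, p.1)))
    (hnd : seen.Nodup) :
    (ks.foldl pvStep (d, (seen.length : Int))).1.items
      = (PySem.List.enumerate (PySem.Set.update seen ks)).map (fun p => (p.2, p.1)) := by
  induction ks generalizing seen d with
  | nil => simpa [PySem.Set.update] using hi
  | cons k ks ih =>
    simp only [List.foldl_cons, PySem.Set.update_cons, pvStep]
    by_cases hmem : k ∈ seen
    · have hc : d.contains k = true := by
        rw [PySem.Dict.contains_iff_mem_keys, hk]; exact hmem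
      rw [hc]
      simp only [if_true]
      rw [PySem.Set.add_of_mem hmem]
      exact ih seen d hk hi hnd
    · have hc : d.contains k = false := by
        rw [Bool.eq_false_iff]
        intro h
        exact hmem (by rw [← hk]; exact (PySem.Dict.contains_iff_mem_keys _ _).mp h)
      rw [hc]
      simp only [Bool.false_eq_true, if_false]
      rw [PySem.Set.add_of_not_mem hmem]
      have hk' : PySem.Dict.keys (d.insert k (seen.length : Int)) = seen ++ [k] := by
        rw [PySem.Dict.keys_insert_of_not_contains d _ hc, hk]
      have hi' : (d.insert k (seen.length : Int)).items
          = (PySem.List.enumerate (seen ++ [k])).map (fun p => (p.2, p.1)) := by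
        rw [PySem.Dict.items_insert_of_not_contains d _ hc, hi,
          PySem.List.enumerate_append]
        simp [PySem.List.enumerate]
      have hlen : ((seen ++ [k]).length : Int) = (seen.length : Int) + 1 := by
        simp
      have hnd' : (seen ++ [k]).Nodup := by
        rw [List.nodup_append]
        exact ⟨hnd, List.nodup_singleton k, by
          intro a ha b hb
          simp only [List.mem_singleton] at hb
          subst hb
          exact fun h => hmem (h ▸ ha)⟩
      have := ih (seen ++ [k]) (d.insert k (seen.length : Int)) hk' hi' hnd'
      rw [hlen] at this
      exact this

-- setdefault, unfolded: keep the dict if the key is present, else insert.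
lemma setdefault_eq (d : PySem.Dict String Int) (k : String) (v : Int) :
    d.setdefault k v = if d.contains k then d else d.insert k v := by
  by_cases h : d.contains k
  · simp [PySem.Dict.setdefault, h]
  · simp only [Bool.not_eq_true] at h
    simp only [PySem.Dict.setdefault, h, Bool.false_eq_true, if_false]
    have := PySem.Dict.items_insert_of_not_contains d (k := k) (v := v) h
    cases hd : d.insert k v
    simp only [hd] at this
    simp [this]

-- B's fold over enumerate(dataset) is the fold of setdefault over the enumerated key list.
lemma b_fold_eq_fold_keys (dataset : List (List String)) (col : Int) (s : Int)
    (d : PySem.Dict String Int) :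
    (PySem.List.enumerate dataset s).foldl
      (fun (d : PySem.Dict String Int) p => d.setdefault (PySem.List.pyGetD p.2 col "") p.1) d
    = (PySem.List.enumerate (dataset.map (fun row => PySem.List.pyGetD row col "")) s).foldl
      (fun (d : PySem.Dict String Int) p => d.setdefault p.2 p.1) d := by
  induction dataset generalizing s d with
  | nil => rfl
  | cons row rest ih =>
    simp only [List.map_cons, PySem.List.enumerate_cons, List.foldl_cons]
    exact ih (s + 1) _

-- B-side loop invariant: folding setdefault over enumerate ks s, starting from a dict
-- whose keys are 'seen' with values strictly increasing and below s, yields a dict whose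
-- keys are Set.update seen ks and whose values still strictly increase along the keys.
lemma b_invariant (ks : List String) (s : Int) (seen : List String)
    (d : PySem.Dict String Int)
    (hk : PySem.Dict.keys d = seen)
    (hb : ∀ k ∈ seen, d.getD k 0 < s)
    (hp : seen.Pairwise (fun a b => d.getD a 0 < d.getD b 0)) :
    PySem.Dict.keys ((PySem.List.enumerate ks s).foldl
        (fun (d : PySem.Dict String Int) p => d.setdefault p.2 p.1) d)
      = PySem.Set.update seen ks ∧
    (PySem.Set.update seen ks).Pairwise
      (fun a b => ((PySem.List.enumerate ks s).foldl
          (fun (d : PySem.Dict String Int) p => d.setdefault p.2 p.1) d).getD a 0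
        < ((PySem.List.enumerate ks s).foldl
          (fun (d : PySem.Dict String Int) p => d.setdefault p.2 p.1) d).getD b 0) := by
  induction ks generalizing s seen d with
  | nil => exact ⟨by simpa [PySem.Set.update] using hk, by simpa [PySem.Set.update] using hp⟩
  | cons k ks ih =>
    simp only [PySem.List.enumerate_cons, List.foldl_cons, PySem.Set.update_cons]
    rw [setdefault_eq]
    by_cases hmem : k ∈ seen
    · have hc : d.contains k = true := by
        rw [PySem.Dict.contains_iff_mem_keys, hk]; exact hmem
      rw [hc]
      simp only [if_true]
      rw [PySem.Set.add_of_mem hmem]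
      exact ih (s + 1) seen d hk (fun a ha => lt_trans (hb a ha) (by omega)) hp
    · have hc : d.contains k = false := by
        rw [Bool.eq_false_iff]
        intro h
        exact hmem (by rw [← hk]; exact (PySem.Dict.contains_iff_mem_keys _ _).mp h)
      rw [hc]
      simp only [Bool.false_eq_true, if_false]
      rw [PySem.Set.add_of_not_mem hmem]
      have hgd : ∀ a : String, (d.insert k s).getD a 0 = if a = k then s else d.getD a 0 := by
        intro a
        rw [PySem.Dict.getD_insert]
      have hk2 : PySem.Dict.keys (d.insert k s) = seen ++ [k] := by
        rw [PySem.Dict.keys_insert_of_not_contains d _ hc, hk]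
      have hb2 : ∀ a ∈ seen ++ [k], (d.insert k s).getD a 0 < s + 1 := by
        intro a ha
        rw [hgd a]
        rcases List.mem_append.mp ha with ha2 | ha2
        · have hne : a ≠ k := fun hh => hmem (hh ▸ ha2)
          simp only [hne, if_false]
          exact lt_trans (hb a ha2) (by omega)
        · simp only [List.mem_singleton] at ha2
          simp [ha2]
      have hp2 : (seen ++ [k]).Pairwise
          (fun a b => (d.insert k s).getD a 0 < (d.insert k s).getD b 0) := by
        rw [List.pairwise_append]
        refine ⟨?_, List.pairwise_singleton _ _, ?_⟩
        · refine hp.imp_of_mem ?_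
          intro x y hx hy hlt
          have hnx : x ≠ k := fun hh => hmem (hh ▸ hx)
          have hny : y ≠ k := fun hh => hmem (hh ▸ hy)
          rw [hgd x, hgd y]
          simp only [hnx, hny, if_false]
          exact hlt
        · intro x hx y hy
          simp only [List.mem_singleton] at hy
          have hnx : x ≠ k := fun hh => hmem (hh ▸ hx)
          rw [hy, hgd x, hgd k]
          simpa [hnx] using hb x hx
      exact ih (s + 1) (seen ++ [k]) (d.insert k s) hk2 hb2 hp2

-- B's result, in closed form: the enumeration of the ordered distinct key list.
lemma alt_eq (dataset : List (List String)) (col : Int) :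
    buildClassMap_alt dataset col
      = (PySem.List.enumerate
          (PySem.Set.update [] (dataset.map (fun row => PySem.List.pyGetD row col "")))).map
          (fun p => (p.2, p.1)) := by
  show (PySem.List.enumerate (PySem.List.sorted
      (PySem.Dict.keys ((PySem.List.enumerate dataset).foldl
        (fun (d : PySem.Dict String Int) p => d.setdefault (PySem.List.pyGetD p.2 col "") p.1)
        PySem.Dict.empty))
      (fun k => ((PySem.List.enumerate dataset).foldl
        (fun (d : PySem.Dict String Int) p => d.setdefault (PySem.List.pyGetD p.2 col "") p.1)
        PySem.Dict.empty).getD k 0) false)).map (fun p => (p.2, p.1)) = _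
  rw [b_fold_eq_fold_keys dataset col 0 PySem.Dict.empty]
  obtain ⟨hBk, hBp⟩ := b_invariant (dataset.map (fun row => PySem.List.pyGetD row col "")) 0 []
    PySem.Dict.empty rfl (by simp) (by simp)
  have hperm : (PySem.Set.update [] (dataset.map (fun row => PySem.List.pyGetD row col ""))).Perm
      (PySem.Dict.keys ((PySem.List.enumerate (dataset.map (fun row => PySem.List.pyGetD row col "")) 0).foldl
        (fun (d : PySem.Dict String Int) p => d.setdefault p.2 p.1) PySem.Dict.empty)) := by
    rw [hBk]
  exact congrArg (fun l => (PySem.List.enumerate l).map (fun p => (p.2, p.1)))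
    (PySem.List.sorted_eq_of_perm_of_pairwise_lt _ _ _ hperm hBp)

-- ===== VERDICT (by name: the statement is the Claim_ definition above) =====
theorem buildClassMap_spec : Claim_equal_buildClassMap := by
  intro dataset col _ hpre
  unfold Spec_buildClassMap buildClassMap
  rw [fold_rows_eq_fold_keys dataset col hpre, alt_eq]
  have hA := loop_invariant (dataset.map (fun row => PySem.List.pyGetD row col "")) []
    PySem.Dict.empty rfl rfl (by simp)
  simpa using hA
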